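-- pv_equiv track=rewrite | github.com/GENIVI/navigation-next | common/c/build/util/NBMParser.py | __half_to_float
-- ===== SOURCE A (Python) =====
-- def swp_bytes(X):
--     "swap low and high byte of short type"
--     return ((X & 0xFF) << 8) | (X >> 8)
--
-- def __half_to_float(h):
--     """
--     """
--     h = swp_bytes(h)
--     s = int((h >> 15) & 0x00000001)    # sign
--     e = int((h >> 10) & 0x0000001f)    # exponent
--     f = int(h & 0x000003ff)            # fraction
--     if e == 0:
--         if f == 0:
--             return int(s << 31)
--         else:
--             while not (f & 0x00000400):
--                 f = f << 1
--                 e -= 1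
--             e += 1
--             f &= ~0x00000400
--     elif e == 31:
--         if f == 0:
--             return int((s << 31) | 0x7f800000)
--         else:
--             return int((s << 31) | 0x7f800000 | (f << 13))
--
--     e = e + (127 -15)
--     f = f << 13
--     return int((s << 31) | (e << 23) | f)
-- ===== SOURCE B (Python) =====
-- def swp_bytes(X):
--     "swap low and high byte of short type"
--     return ((X & 0xFF) << 8) | (X >> 8)
--
-- def __half_to_float(h):
--     h = swp_bytes(h)
--     s = (h >> 15) & 1
--     e = (h >> 10) & 0x1F
--     f = h & 0x3FF
--     if e == 0:
--         if f == 0: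
--             return s << 31
--         # subnormal: closed-form normalization via bit_length instead of a shift loop
--         n = f.bit_length()
--         e = n - 10
--         f = (f << (11 - n)) & 0x3FF
--     elif e == 31:
--         return (s << 31) | 0x7F800000 | (f << 13)
--     return (s << 31) | ((e + 112) << 23) | (f << 13)
-- ===== Notes on version B (the rewrite author's own statement) =====
-- stated objective: simpler
-- what changed: The subnormal-branch while-loop normalization is replaced by a closed form computed from f.bit_length(), and the two infinity/NaN returns are merged into one because shifting a zero fraction contributes nothing.
import Mathlib
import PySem

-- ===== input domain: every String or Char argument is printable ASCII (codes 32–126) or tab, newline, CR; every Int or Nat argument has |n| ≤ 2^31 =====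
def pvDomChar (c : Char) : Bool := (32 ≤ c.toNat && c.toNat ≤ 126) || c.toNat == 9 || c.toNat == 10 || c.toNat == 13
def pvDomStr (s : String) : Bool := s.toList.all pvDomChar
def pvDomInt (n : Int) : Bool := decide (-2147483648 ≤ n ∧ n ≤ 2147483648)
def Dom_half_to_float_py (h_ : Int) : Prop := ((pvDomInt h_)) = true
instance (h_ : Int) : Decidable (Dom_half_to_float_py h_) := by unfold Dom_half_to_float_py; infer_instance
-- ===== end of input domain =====

-- B replaces A's subnormal while-loop normalization by a closed form from f.bit_length()
-- and merges the two e==31 returns; objective: simpler (no speed claim).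

-- ===== PORT A =====
def swpBytes (X : Int) : Int := PySem.Int.bor ((PySem.Int.band X 0xFF) <<< 8) (X >>> 8)

-- fuel-bounded transliteration of A's 'while not (f & 0x400)' loop; fuel 11 is enough
-- because A only reaches it with 0 < f < 1024 (at most ten doublings set bit 10)
def normLoop : Nat → Int → Int → Int × Int
  | 0, f, e => (f, e)
  | fuel + 1, f, e =>
    if PySem.Int.band f 0x400 = 0 then normLoop fuel (f <<< 1) (e - 1) else (f, e)

def half_to_float_py (h_ : Int) : Int :=
  let h := swpBytes h_
  let s := PySem.Int.band (h >>> 15) 0x1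
  let e := PySem.Int.band (h >>> 10) 0x1f
  let f := PySem.Int.band h 0x3ff
  if e = 0 then
    if f = 0 then s <<< 31
    else
      let p := normLoop 11 f e
      let e := p.2 + 1
      let f := PySem.Int.band p.1 (Int.not 0x400)
      let e := e + (127 - 15)
      let f := f <<< 13
      PySem.Int.bor (PySem.Int.bor (s <<< 31) (e <<< 23)) f
  else if e = 31 then
    if f = 0 then PySem.Int.bor (s <<< 31) 0x7f800000
    else PySem.Int.bor (PySem.Int.bor (s <<< 31) 0x7f800000) (f <<< 13)
  else
    let e := e + (127 - 15)
    let f := f <<< 13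
    PySem.Int.bor (PySem.Int.bor (s <<< 31) (e <<< 23)) f

-- ===== PORT B =====
def half_to_float_py_alt (h_ : Int) : Int :=
  let h := swpBytes h_
  let s := PySem.Int.band (h >>> 15) 0x1
  let e := PySem.Int.band (h >>> 10) 0x1f
  let f := PySem.Int.band h 0x3ff
  if e = 0 then
    if f = 0 then s <<< 31
    else
      let n := PySem.Int.bitLength f
      let e := (n : Int) - 10
      let f := PySem.Int.band (f <<< (11 - n)) 0x3ff
      PySem.Int.bor (PySem.Int.bor (s <<< 31) ((e + 112) <<< 23)) (f <<< 13)
  else if e = 31 then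
    PySem.Int.bor (PySem.Int.bor (s <<< 31) 0x7f800000) (f <<< 13)
  else
    PySem.Int.bor (PySem.Int.bor (s <<< 31) ((e + 112) <<< 23)) (f <<< 13)

-- ===== PRECONDITION & SPEC =====
def Spec_half_to_float_py (h_ : Int) (out : Int) : Prop := out = half_to_float_py_alt h_
instance (h_ : Int) (out : Int) : Decidable (Spec_half_to_float_py h_ out) := by unfold Spec_half_to_float_py; infer_instance

-- ===== CLAIM (what is proved, stated in full; the proofs are below) =====
def Claim_equal_half_to_float_py : Prop := ∀ (h_ : Int), Dom_half_to_float_py h_ → Spec_half_to_float_py h_ (half_to_float_py h_)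

-- ===== LEMMAS AND PROOFS =====

-- the branching tail of A, as a function of the extracted fields
def coreA (s e f : Int) : Int :=
  if e = 0 then
    if f = 0 then s <<< 31
    else
      PySem.Int.bor (PySem.Int.bor (s <<< 31) (((normLoop 11 f e).2 + 1 + (127 - 15)) <<< 23))
        (PySem.Int.band (normLoop 11 f e).1 (Int.not 0x400) <<< 13)
  else if e = 31 then
    if f = 0 then PySem.Int.bor (s <<< 31) 0x7f800000
    else PySem.Int.bor (PySem.Int.bor (s <<< 31) 0x7f800000) (f <<< 13)
  else
    PySem.Int.bor (PySem.Int.bor (s <<< 31) ((e + (127 - 15)) <<< 23)) (f <<< 13)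

-- the branching tail of B, as a function of the extracted fields
def coreB (s e f : Int) : Int :=
  if e = 0 then
    if f = 0 then s <<< 31
    else
      PySem.Int.bor (PySem.Int.bor (s <<< 31) ((((PySem.Int.bitLength f : Int) - 10) + 112) <<< 23))
        (PySem.Int.band (f <<< (11 - PySem.Int.bitLength f)) 0x3ff <<< 13)
  else if e = 31 then
    PySem.Int.bor (PySem.Int.bor (s <<< 31) 0x7f800000) (f <<< 13)
  else
    PySem.Int.bor (PySem.Int.bor (s <<< 31) ((e + 112) <<< 23)) (f <<< 13)

theorem portA_core (h : Int) : half_to_float_py h =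
    coreA (PySem.Int.band (swpBytes h >>> 15) 0x1)
          (PySem.Int.band (swpBytes h >>> 10) 0x1f)
          (PySem.Int.band (swpBytes h) 0x3ff) := rfl

theorem portB_core (h : Int) : half_to_float_py_alt h =
    coreB (PySem.Int.band (swpBytes h >>> 15) 0x1)
          (PySem.Int.band (swpBytes h >>> 10) 0x1f)
          (PySem.Int.band (swpBytes h) 0x3ff) := rfl

-- the masked fraction is always in [0, 1024)
theorem band_mask1023_bounds (w : Int) :
    0 ≤ PySem.Int.band w 1023 ∧ PySem.Int.band w 1023 < 1024 := by
  unfold PySem.Int.band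
  split_ifs with h1 h2 h2
  · refine ⟨by positivity, ?_⟩
    have : w.toNat &&& (1023 : Int).toNat ≤ (1023 : Int).toNat := Nat.and_le_right
    omega
  · omega
  · refine ⟨by positivity, ?_⟩
    have : (1023 : Int).toNat - ((1023 : Int).toNat &&& (-w - 1).toNat) ≤ (1023 : Int).toNat :=
      Nat.sub_le _ _
    omega
  · omega

-- the subnormal branch: A's loop result agrees with B's closed form, for every
-- fraction value 0 < f < 1024 (checked exhaustively)
set_option maxRecDepth 20000 in
theorem subnormal_eq : ∀ m : Nat, m < 1023 →
    ((normLoop 11 ((m : Int) + 1) 0).2 + 1 + (127 - 15),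
      PySem.Int.band (normLoop 11 ((m : Int) + 1) 0).1 (Int.not 0x400) <<< 13)
      = (((PySem.Int.bitLength ((m : Int) + 1) : Int) - 10) + 112,
         PySem.Int.band (((m : Int) + 1) <<< (11 - PySem.Int.bitLength ((m : Int) + 1))) 0x3ff <<< 13) := by
  decide

theorem core_eq (s e f : Int) (hf0 : 0 ≤ f) (hf1 : f < 1024) : coreA s e f = coreB s e f := by
  unfold coreA coreB
  by_cases he : e = 0
  · subst he
    by_cases hz : f = 0
    · simp [hz]
    · simp only [if_neg hz]
      obtain ⟨m, hmlt, rfl⟩ : ∃ m : Nat, m < 1023 ∧ f = (m : Int) + 1 :=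
        ⟨(f - 1).toNat, by omega, by omega⟩
      have h := subnormal_eq m hmlt
      have h1 := congrArg Prod.fst h
      have h2 := congrArg Prod.snd h
      simp only at h1 h2
      rw [h1, h2]
      rfl
  · by_cases he31 : e = 31
    · subst he31
      by_cases hz : f = 0
      · simp [hz]
      · simp [hz]
    · simp [he, he31]

-- ===== VERDICT (by name: the statement is the Claim_ definition above) =====
theorem half_to_float_py_spec : Claim_equal_half_to_float_py := by
  intro h_ _
  unfold Spec_half_to_float_py
  rw [portA_core, portB_core]
  have hb := band_mask1023_bounds (swpBytes h_)
  exact core_eq _ _ _ hb.1 hb.2
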